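-- pv_equiv track=rewrite | github.com/starryboram/Algorithm | Programmers/Level1/09. 과일 장수.py | solution
-- ===== SOURCE A (Python) =====
-- def solution(k, m, score):
--     score = reversed(sorted(score))
--     result = 0
--     arr = []
--     for i in score:
--         arr.append(i)
--         if len(arr) == m:
--             result += min(arr) * m
--             arr = []
--     return result
-- ===== SOURCE B (Python) =====
-- def solution(k, m, score):
--     if m <= 0:
--         return 0
--     s = sorted(score, reverse=True)
--     return m * sum(s[i] for i in range(m - 1, len(s), m))
-- ===== Notes on version B (the rewrite author's own statement) =====
-- stated objective: simpler
-- what changed: Replaces A's buffer list + len check + min() accumulation loop with a closed-form strided index sum: after one descending sort each full box's minimum sits at index m-1, 2m-1, ..., so B sums s[i] for i in range(m-1, len(s), m) and multiplies by m once (m<=0 short-circuits to 0, the value A reaches because its len(arr)==m test never fires).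
import Mathlib
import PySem

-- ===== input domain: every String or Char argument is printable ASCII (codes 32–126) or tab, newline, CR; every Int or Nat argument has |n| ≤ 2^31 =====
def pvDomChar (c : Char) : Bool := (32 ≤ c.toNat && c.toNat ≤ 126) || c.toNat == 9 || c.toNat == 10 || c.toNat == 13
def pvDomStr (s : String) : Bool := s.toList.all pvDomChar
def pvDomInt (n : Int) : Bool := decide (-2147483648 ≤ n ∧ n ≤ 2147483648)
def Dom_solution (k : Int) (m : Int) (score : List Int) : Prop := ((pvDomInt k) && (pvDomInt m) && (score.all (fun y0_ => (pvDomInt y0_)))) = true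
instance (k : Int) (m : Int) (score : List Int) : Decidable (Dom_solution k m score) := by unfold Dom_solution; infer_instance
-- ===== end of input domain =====

-- B replaces A's buffer/min() accumulation loop by a strided index sum over one descending sort (same value, simpler code).

-- ===== PORT A =====
-- the step of A's loop: append i to the buffer, flush a full box of size m
def stepA (m : Int) (st : Int × List Int) (i : Int) : Int × List Int :=
  let arr := st.2 ++ [i]
  if (arr.length : Int) = m then
    (st.1 + (PySem.List.min? arr (fun x => x)).getD 0 * m, ([] : List Int))
  else (st.1, arr)

-- score = reversed(sorted(score)); then the loop over it with state (result, arr).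
-- min(arr) is only evaluated when len(arr) == m with m ≥ 1, so arr is nonempty there and `.getD 0` never supplies the raising case.
def solution (k : Int) (m : Int) (score : List Int) : Int :=
  ((PySem.List.sorted score (fun x => x)).reverse.foldl (stepA m) (0, ([] : List Int))).1

-- ===== PORT B =====
-- s[i] inside the generator: every index produced by range(m-1, len(s), m) lies in [0, len s), so pyGetD's default is never used.
def solution_alt (k : Int) (m : Int) (score : List Int) : Int :=
  if m ≤ 0 then 0
  else
    m * ((PySem.List.pyRange (m - 1) ((PySem.List.sorted score (fun x => x) true).length : Int) m).map
          (fun i => PySem.List.pyGetD (PySem.List.sorted score (fun x => x) true) i 0)).sum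

-- ===== PRECONDITION & SPEC =====
def Spec_solution (k : Int) (m : Int) (score : List Int) (out : Int) : Prop := out = solution_alt k m score
instance (k : Int) (m : Int) (score : List Int) (out : Int) : Decidable (Spec_solution k m score out) := by unfold Spec_solution; infer_instance

-- ===== CLAIM (what is proved, stated in full; the proofs are below) =====
def Claim_equal_solution : Prop := ∀ (k : Int) (m : Int) (score : List Int), Dom_solution k m score → Spec_solution k m score (solution k m score)

-- ===== LEMMAS AND PROOFS =====

-- the common mathematical value: sum of the elements at indices m'-1, 2m'-1, … of s
def gsum (m' : Nat) (s : List Int) : Int :=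
  if h : 1 ≤ m' ∧ m' ≤ s.length then s.getD (m' - 1) 0 + gsum m' (s.drop m') else 0
termination_by s.length
decreasing_by simp only [List.length_drop]; omega

theorem pyRange_pos_nil {a b st : Int} (hst : 0 < st) (h : b ≤ a) :
    PySem.List.pyRange a b st = [] := by
  rw [PySem.List.pyRange_of_pos a b hst]
  simp [Int.not_lt.mpr h]

theorem pyRange_pos_cons {a b st : Int} (hst : 0 < st) (hab : a < b) :
    PySem.List.pyRange a b st = a :: PySem.List.pyRange (a + st) b st := by
  rw [PySem.List.pyRange_of_pos a b hst, PySem.List.pyRange_of_pos (a + st) b hst]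
  by_cases h2 : a + st < b
  · have hq : 0 ≤ (b - a - 1) / st := Int.ediv_nonneg (by omega) (by omega)
    have hc : (b - a + st - 1) / st = (b - a - 1) / st + 1 := by
      have h := Int.add_mul_ediv_right (b - a - 1) 1 (show st ≠ 0 by omega)
      rw [one_mul] at h
      rw [show b - a + st - 1 = b - a - 1 + st by ring, h]
    have hb2 : b - (a + st) + st - 1 = b - a - 1 := by ring
    rw [if_pos hab, if_pos h2, hb2, hc,
      show ((b - a - 1) / st + 1).toNat = ((b - a - 1) / st).toNat + 1 by omega,
      List.range_succ_eq_map]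
    simp only [List.map_cons, List.map_map, Nat.cast_zero, mul_zero, add_zero]
    refine congrArg₂ List.cons rfl ?_
    apply List.map_congr_left
    intro x _
    simp only [Function.comp_apply, Nat.succ_eq_add_one]
    push_cast
    ring
  · have h1 : 1 ≤ (b - a + st - 1) / st := (Int.le_ediv_iff_mul_le hst).mpr (by omega)
    have h2' : (b - a + st - 1) / st < 2 := (Int.ediv_lt_iff_lt_mul hst).mpr (by omega)
    rw [if_pos hab, if_neg h2, show ((b - a + st - 1) / st).toNat = 1 by omega]
    simp

-- shifting a strided index sum across a drop
theorem strided_shift {st : Int} (hst : 0 < st) {a : Int} (ha : 0 ≤ a) (s : List Int) :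
    (PySem.List.pyRange (a + st) (s.length : Int) st).map (fun i => PySem.List.pyGetD s i 0)
      = (PySem.List.pyRange a ((s.drop st.toNat).length : Int) st).map
          (fun i => PySem.List.pyGetD (s.drop st.toNat) i 0) := by
  rw [PySem.List.pyRange_of_pos _ _ hst, PySem.List.pyRange_of_pos _ _ hst]
  have hlen : ((s.drop st.toNat).length : Int) = max ((s.length : Int) - st) 0 := by
    simp only [List.length_drop]; omega
  have hcount : (if a + st < (s.length : Int) then (((s.length : Int) - (a + st) + st - 1) / st).toNat else 0)
      = (if a < ((s.drop st.toNat).length : Int) then ((((s.drop st.toNat).length : Int) - a + st - 1) / st).toNat else 0) := by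
    rw [hlen]
    by_cases hc : a + st < (s.length : Int)
    · rw [if_pos hc, if_pos (by omega)]
      rw [show max ((s.length : Int) - st) 0 = (s.length : Int) - st by omega]
      congr 1; ring
    · rw [if_neg hc, if_neg (by omega)]
  rw [hcount]
  simp only [List.map_map]
  apply List.map_congr_left
  intro x _
  simp only [Function.comp_apply]
  have hx : (0 : Int) ≤ (x : Int) := by positivity
  have hmul : (0 : Int) ≤ st * (x : Int) := mul_nonneg (le_of_lt hst) hx
  rw [PySem.List.pyGetD_of_nonneg _ _ (by omega), PySem.List.pyGetD_of_nonneg _ _ (by omega)]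
  rw [List.getD_eq_getElem?_getD, List.getD_eq_getElem?_getD, List.getElem?_drop]
  congr 2
  omega

-- B's strided sum computes gsum
theorem B_char (m : Int) (hm : 0 < m) (s : List Int) :
    ((PySem.List.pyRange (m - 1) (s.length : Int) m).map (fun i => PySem.List.pyGetD s i 0)).sum
      = gsum m.toNat s := by
  have H : ∀ (n : Nat) (s : List Int), s.length ≤ n →
      ((PySem.List.pyRange (m - 1) (s.length : Int) m).map (fun i => PySem.List.pyGetD s i 0)).sum
        = gsum m.toNat s := by
    intro n
    induction n with
    | zero =>
      intro s hs
      have hs0 : s = [] := List.length_eq_zero_iff.mp (by omega)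
      subst hs0
      rw [pyRange_pos_nil hm (by simp only [List.length_nil, Nat.cast_zero]; omega)]
      rw [gsum, dif_neg (by simp only [List.length_nil]; omega)]
      simp
    | succ n ih =>
      intro s hs
      by_cases hlen : m ≤ (s.length : Int)
      · rw [pyRange_pos_cons hm (by omega), List.map_cons, List.sum_cons]
        rw [strided_shift hm (show (0:Int) ≤ m - 1 by omega) s]
        have hdrop : (s.drop m.toNat).length ≤ n := by rw [List.length_drop]; omega
        rw [ih (s.drop m.toNat) hdrop]
        rw [PySem.List.pyGetD_of_nonneg _ _ (show (0:Int) ≤ m - 1 by omega),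
          show (m - 1).toNat = m.toNat - 1 by omega]
        conv_rhs => rw [gsum]
        rw [dif_pos (show 1 ≤ m.toNat ∧ m.toNat ≤ s.length by constructor <;> omega)]
      · rw [pyRange_pos_nil hm (by omega)]
        rw [gsum, dif_neg (by omega)]
        simp
  exact H s.length s le_rfl

-- min of a nonempty nonincreasing list is its last element
theorem foldl_min_last (t : List Int) : ∀ (x : Int),
    List.Pairwise (fun a b => b ≤ a) (x :: t) →
    t.foldl min x = (x :: t).getD ((x :: t).length - 1) 0 := by
  induction t with
  | nil => intro x _; simp
  | cons y t' ih =>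
    intro x hp
    have hyx : y ≤ x := (List.pairwise_cons.mp hp).1 y (by simp)
    have hp' : List.Pairwise (fun a b : Int => b ≤ a) (y :: t') := (List.pairwise_cons.mp hp).2
    simp only [List.foldl_cons, min_eq_right hyx]
    rw [ih y hp']
    rfl

theorem min_last (l : List Int) (h : l ≠ [])
    (hp : List.Pairwise (fun a b => b ≤ a) l) :
    (PySem.List.min? l (fun x => x)).getD 0 = l.getD (l.length - 1) 0 := by
  cases l with
  | nil => exact absurd rfl h
  | cons x t =>
    rw [PySem.List.min?_id_cons]
    simp only [Option.getD_some]
    exact foldl_min_last t x hp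

theorem foldA_nonpos (m : Int) (hm : m ≤ 0) (s : List Int) : ∀ (r : Int) (arr : List Int),
    (s.foldl (stepA m) (r, arr)).1 = r := by
  induction s with
  | nil => intro r arr; rfl
  | cons i t ih =>
    intro r arr
    rw [List.foldl_cons]
    rw [show stepA m (r, arr) i = (r, arr ++ [i]) from by
      unfold stepA
      rw [if_neg (by simp only [List.length_append, List.length_cons, List.length_nil]; omega)]]
    exact ih r (arr ++ [i])

theorem A_char (m : Int) (hm : 0 < m) (s : List Int) : ∀ (arr : List Int) (r : Int),
    (arr.length : Int) < m →
    List.Pairwise (fun a b => b ≤ a) (arr ++ s) →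
    (s.foldl (stepA m) (r, arr)).1 = r + m * gsum m.toNat (arr ++ s) := by
  induction s with
  | nil =>
    intro arr r hlen hp
    simp only [List.foldl_nil, List.append_nil]
    rw [gsum, dif_neg (by omega)]
    ring
  | cons i t ih =>
    intro arr r hlen hp
    rw [List.foldl_cons]
    have hassoc : arr ++ i :: t = (arr ++ [i]) ++ t := by simp
    by_cases hfull : ((arr ++ [i]).length : Int) = m
    · have hlm : (arr ++ [i]).length = m.toNat := by
        simp only [List.length_append, List.length_cons, List.length_nil] at hfull ⊢
        omega
      rw [show stepA m (r, arr) i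
          = (r + (PySem.List.min? (arr ++ [i]) (fun x => x)).getD 0 * m, ([] : List Int)) from by
        unfold stepA; rw [if_pos hfull]]
      rw [hassoc] at hp
      have hpt : List.Pairwise (fun a b : Int => b ≤ a) t := (List.pairwise_append.mp hp).2.1
      have hpa : List.Pairwise (fun a b : Int => b ≤ a) (arr ++ [i]) := (List.pairwise_append.mp hp).1
      have hne : arr ++ [i] ≠ [] := by simp
      rw [ih ([] : List Int) (r + (PySem.List.min? (arr ++ [i]) (fun x => x)).getD 0 * m)
        (by simpa using hm) (by simpa using hpt)]
      rw [min_last (arr ++ [i]) hne hpa, hassoc]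
      conv_rhs => rw [gsum]
      rw [dif_pos (show 1 ≤ m.toNat ∧ m.toNat ≤ ((arr ++ [i]) ++ t).length by
        constructor
        · omega
        · rw [List.length_append, hlm]; omega)]
      rw [show ((arr ++ [i]) ++ t).drop m.toNat = t from by rw [← hlm, List.drop_left]]
      have hlt : m.toNat - 1 < (arr ++ [i]).length := by omega
      rw [show ((arr ++ [i]) ++ t).getD (m.toNat - 1) 0 = (arr ++ [i]).getD (m.toNat - 1) 0 from by
        rw [List.getD_eq_getElem?_getD, List.getD_eq_getElem?_getD, List.getElem?_append_left hlt]]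
      rw [show (arr ++ [i]).length - 1 = m.toNat - 1 from by omega]
      simp only [List.nil_append]
      ring
    · rw [show stepA m (r, arr) i = (r, arr ++ [i]) from by
        unfold stepA; rw [if_neg hfull]]
      have hlen' : ((arr ++ [i]).length : Int) < m := by
        simp only [List.length_append, List.length_cons, List.length_nil] at hfull ⊢
        omega
      rw [ih (arr ++ [i]) r hlen' (by rw [← hassoc]; exact hp), ← hassoc]

-- Python's sorted(xs, reverse=True) and reversed(sorted(xs)) coincide on Int
theorem sorted_rev_eq_reverse (score : List Int) :
    PySem.List.sorted score (fun x => x) true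
      = (PySem.List.sorted score (fun x => x)).reverse := by
  refine List.Perm.eq_of_pairwise (le := fun a b : Int => b ≤ a)
    (fun _ _ _ _ h1 h2 => le_antisymm h2 h1)
    (PySem.List.sorted_pairwise_rev score (fun x => x))
    (List.pairwise_reverse.mpr (by simpa using PySem.List.sorted_pairwise score (fun x => x)))
    (((PySem.List.sorted_perm score (fun x => x) true).trans
      ((PySem.List.sorted_perm score (fun x => x) false).symm)).trans
      (List.reverse_perm _).symm)

-- ===== VERDICT (by name: the statement is the Claim_ definition above) =====
theorem solution_spec : Claim_equal_solution := by
  intro k m score _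
  unfold Spec_solution solution solution_alt
  by_cases hm : m ≤ 0
  · rw [if_pos hm]
    exact foldA_nonpos m hm _ 0 []
  · rw [if_neg hm]
    have hm' : 0 < m := by omega
    rw [← sorted_rev_eq_reverse score]
    have hpair : List.Pairwise (fun a b : Int => b ≤ a)
        (([] : List Int) ++ PySem.List.sorted score (fun x => x) true) := by
      simpa using PySem.List.sorted_pairwise_rev score (fun x => x)
    have hA := A_char m hm' (PySem.List.sorted score (fun x => x) true) [] 0 (by simpa using hm') hpair
    simp only [List.nil_append] at hA
    rw [hA, B_char m hm']
    ring
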